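-- pv_equiv track=rewrite | github.com/dsweet99/dryer | test/benchmark_data/module_002.py | compute_2_10
-- ===== SOURCE A (Python) =====
-- def compute_2_10(a, b, c):
--     x = a * 65 + b * 98
--     y = c * 75 - a * 128
--     for i in range(17):
--         x = x + i * 17
--         y = y - i * 23
--         if x > 5300:
--             x = x % 1150
--     return x + y + 21
-- ===== SOURCE B (Python) =====
-- # B: closed-form reformulation. Along A's loop, x only exceeds 5300 before the
-- # first reduction (after x % 1150 we have x < 1150, and the remaining additions
-- # total at most 2312, so x stays below 3462 < 5300 forever after). Hence the
-- # whole loop equals: find the FIRST prefix sum S[k] = sum(i*17 for i <= k) with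
-- # x0 + S[k] > 5300, reduce once, and add the rest of the increments in closed
-- # form. y never depends on the loop state: y = c*75 - a*128 - 3128.
--
-- SUMS = [17 * k * (k + 1) // 2 for k in range(17)]  # S[k]: increments applied through step k
-- TOTAL = 2312  # SUMS[16], the sum of all increments
--
-- def compute_2_10(a, b, c):
--     x0 = a * 65 + b * 98
--     y = c * 75 - a * 128 - 3128
--     s = next((s for s in SUMS if x0 + s > 5300), None)
--     if s is None:
--         return x0 + TOTAL + y + 21
--     return (x0 + s) % 1150 + (TOTAL - s) + y + 21
-- ===== Notes on version B (the rewrite author's own statement) =====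
-- stated objective: alternative
-- what changed: The stateful 17-step loop over (x, y) is replaced by a closed form: since the `x % 1150` reduction can fire at most once, B scans a precomputed table of prefix sums for the first crossing of 5300, applies a single mod there, and adds the remaining increments and y = c*75 - a*128 - 3128 in closed form.
import Mathlib
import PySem

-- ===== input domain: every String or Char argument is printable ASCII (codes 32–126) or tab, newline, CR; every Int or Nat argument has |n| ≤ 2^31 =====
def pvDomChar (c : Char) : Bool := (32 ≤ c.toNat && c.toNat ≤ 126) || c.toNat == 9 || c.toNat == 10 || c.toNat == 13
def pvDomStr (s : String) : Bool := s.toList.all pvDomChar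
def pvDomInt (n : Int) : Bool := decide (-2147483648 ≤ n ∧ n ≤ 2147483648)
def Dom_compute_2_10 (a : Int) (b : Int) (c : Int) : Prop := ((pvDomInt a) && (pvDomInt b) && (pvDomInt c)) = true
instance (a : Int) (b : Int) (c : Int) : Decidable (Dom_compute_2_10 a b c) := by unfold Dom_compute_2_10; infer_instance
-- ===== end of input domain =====

-- B replaces A's stateful 17-step loop by a closed form: the conditional reduction can
-- fire at most once, at the first prefix sum S[k] with x0 + S[k] > 5300; y is loop-independent.

-- ===== PORT A =====
def compute_2_10 (a : Int) (b : Int) (c : Int) : Int :=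
  let x := a * 65 + b * 98
  let y := c * 75 - a * 128
  let p := (PySem.List.pyRange 0 17 1).foldl (fun (s : Int × Int) i =>
      let x := s.1 + i * 17
      let y := s.2 - i * 23
      let x := if x > 5300 then PySem.Int.mod x 1150 else x
      (x, y)) (x, y)
  p.1 + p.2 + 21

-- ===== PORT B =====
-- prefix sums S[k] = sum of i*17 for i <= k  (Source B: SUMS)
def pvSUMS : List Int := (PySem.List.pyRange 0 17 1).map (fun k => PySem.Int.floordiv (17 * k * (k + 1)) 2)
-- Source B: TOTAL = 2312, the sum of all increments
def pvTOTAL : Int := 2312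

def compute_2_10_alt (a : Int) (b : Int) (c : Int) : Int :=
  let x0 := a * 65 + b * 98
  let y := c * 75 - a * 128 - 3128
  match pvSUMS.find? (fun s => decide (x0 + s > 5300)) with
  | none => x0 + pvTOTAL + y + 21
  | some s => PySem.Int.mod (x0 + s) 1150 + (pvTOTAL - s) + y + 21

-- ===== PRECONDITION & SPEC =====
def Spec_compute_2_10 (a : Int) (b : Int) (c : Int) (out : Int) : Prop := out = compute_2_10_alt a b c
instance (a : Int) (b : Int) (c : Int) (out : Int) : Decidable (Spec_compute_2_10 a b c out) := by unfold Spec_compute_2_10; infer_instance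

-- ===== CLAIM =====
def Claim_equal_compute_2_10 : Prop := ∀ (a : Int) (b : Int) (c : Int), Dom_compute_2_10 a b c → Spec_compute_2_10 a b c (compute_2_10 a b c)

-- ===== LEMMAS AND PROOFS =====

theorem pvmod_bound (z : Int) : 0 ≤ PySem.Int.mod z 1150 ∧ PySem.Int.mod z 1150 < 1150 := by
  rw [PySem.Int.mod_eq_emod_of_pos (by norm_num)]
  exact ⟨Int.emod_nonneg z (by norm_num), Int.emod_lt_of_pos z (by norm_num)⟩

theorem pvstep_le (x i : Int) (h : x + i * 17 ≤ 5300) :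
    (if x + i * 17 > 5300 then PySem.Int.mod (x + i * 17) 1150 else x + i * 17) = x + i * 17 := by
  rw [if_neg (by omega)]

theorem pvstep_gt (x i : Int) (h : x + i * 17 > 5300) :
    (if x + i * 17 > 5300 then PySem.Int.mod (x + i * 17) 1150 else x + i * 17)
      = PySem.Int.mod (x + i * 17) 1150 := by
  rw [if_pos h]

-- no step of the loop reduces when the final value stays at most 5300
theorem pvnomod (l : List Int) : ∀ x : Int, (∀ i ∈ l, 0 ≤ i) → x + l.sum * 17 ≤ 5300 →
    l.foldl (fun x i => if x + i * 17 > 5300 then PySem.Int.mod (x + i * 17) 1150 else x + i * 17) x = x + l.sum * 17 := by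
  induction l with
  | nil => intro x _ _; simp
  | cons a l ih =>
    intro x h1 h2
    have hsl : 0 ≤ l.sum := List.sum_nonneg (fun i hi => h1 i (by simp [hi]))
    rw [List.sum_cons] at h2
    rw [List.foldl_cons, pvstep_le x a (by nlinarith), ih (x + a * 17)
      (fun i hi => h1 i (by simp [hi])) (by nlinarith)]
    rw [List.sum_cons]; ring

-- A-side pair fold splits: x-component is an x-only fold, y just subtracts 23 * sum
theorem pvFold_split (l : List Int) (x y : Int) :
    l.foldl (fun (s : Int × Int) i =>
      let x := s.1 + i * 17
      let y := s.2 - i * 23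
      let x := if x > 5300 then PySem.Int.mod x 1150 else x
      (x, y)) (x, y)
    = (l.foldl (fun x i => if x + i * 17 > 5300 then PySem.Int.mod (x + i * 17) 1150 else x + i * 17) x, y - 23 * l.sum) := by
  induction l generalizing x y with
  | nil => simp
  | cons i l ih =>
    rw [List.foldl_cons, List.foldl_cons, ih]
    simp only [List.sum_cons, Prod.mk.injEq]
    exact ⟨trivial, by ring⟩


-- the x-fold, when the first crossing exists: one reduction, then pure accumulation
theorem pvKey_some (x s : Int)
    (h : pvSUMS.find? (fun t => decide (x + t > 5300)) = some s) :
    (PySem.List.pyRange 0 17 1).foldl (fun x i => if x + i * 17 > 5300 then PySem.Int.mod (x + i * 17) 1150 else x + i * 17) x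
      = PySem.Int.mod (x + s) 1150 + (2312 - s) := by
  rw [show pvSUMS = [0, 17, 51, 102, 170, 255, 357, 476, 612, 765, 935, 1122, 1326, 1547, 1785, 2040, 2312] from by decide] at h
  by_cases h0 : x + 0 > 5300
  · rw [List.find?_cons_of_pos (by simp only [decide_eq_true_eq]; exact h0)] at h
    injection h with h; subst h
    rw [show PySem.List.pyRange 0 17 1 = ([0, 1, 2, 3, 4, 5, 6, 7, 8, 9, 10, 11, 12, 13, 14, 15, 16] : List Int) from by decide]
    rw [List.foldl_cons, pvstep_gt x 0 (by omega)]
    rw [pvnomod [1, 2, 3, 4, 5, 6, 7, 8, 9, 10, 11, 12, 13, 14, 15, 16] _ (by decide)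
      (by rw [show (([1, 2, 3, 4, 5, 6, 7, 8, 9, 10, 11, 12, 13, 14, 15, 16] : List Int).sum) = 136 from by decide]
          have hb := pvmod_bound (x + 0 * 17); omega)]
    rw [show ((x + 0 * 17 : Int)) = x + 0 from by ring]
    rw [show (([1, 2, 3, 4, 5, 6, 7, 8, 9, 10, 11, 12, 13, 14, 15, 16] : List Int).sum) = 136 from by decide]
    norm_num
  rw [List.find?_cons_of_neg (by simp only [decide_eq_true_eq]; exact h0)] at h
  by_cases h1 : x + 17 > 5300
  · rw [List.find?_cons_of_pos (by simp only [decide_eq_true_eq]; exact h1)] at h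
    injection h with h; subst h
    rw [show PySem.List.pyRange 0 17 1 = ([0] : List Int) ++ [1, 2, 3, 4, 5, 6, 7, 8, 9, 10, 11, 12, 13, 14, 15, 16] from by decide, List.foldl_append]
    rw [pvnomod [0] x (by decide) (by rw [show (([0] : List Int).sum) = 0 from by decide]; omega)]
    rw [show (([0] : List Int).sum) = 0 from by decide]
    rw [List.foldl_cons, pvstep_gt (x + 0 * 17) 1 (by omega)]
    rw [pvnomod [2, 3, 4, 5, 6, 7, 8, 9, 10, 11, 12, 13, 14, 15, 16] _ (by decide)
      (by rw [show (([2, 3, 4, 5, 6, 7, 8, 9, 10, 11, 12, 13, 14, 15, 16] : List Int).sum) = 135 from by decide]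
          have hb := pvmod_bound (x + 0 * 17 + 1 * 17); omega)]
    rw [show ((x + 0 * 17 + 1 * 17 : Int)) = x + 17 from by ring]
    rw [show (([2, 3, 4, 5, 6, 7, 8, 9, 10, 11, 12, 13, 14, 15, 16] : List Int).sum) = 135 from by decide]
    norm_num
  rw [List.find?_cons_of_neg (by simp only [decide_eq_true_eq]; exact h1)] at h
  by_cases h2 : x + 51 > 5300
  · rw [List.find?_cons_of_pos (by simp only [decide_eq_true_eq]; exact h2)] at h
    injection h with h; subst h
    rw [show PySem.List.pyRange 0 17 1 = ([0, 1] : List Int) ++ [2, 3, 4, 5, 6, 7, 8, 9, 10, 11, 12, 13, 14, 15, 16] from by decide, List.foldl_append]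
    rw [pvnomod [0, 1] x (by decide) (by rw [show (([0, 1] : List Int).sum) = 1 from by decide]; omega)]
    rw [show (([0, 1] : List Int).sum) = 1 from by decide]
    rw [List.foldl_cons, pvstep_gt (x + 1 * 17) 2 (by omega)]
    rw [pvnomod [3, 4, 5, 6, 7, 8, 9, 10, 11, 12, 13, 14, 15, 16] _ (by decide)
      (by rw [show (([3, 4, 5, 6, 7, 8, 9, 10, 11, 12, 13, 14, 15, 16] : List Int).sum) = 133 from by decide]
          have hb := pvmod_bound (x + 1 * 17 + 2 * 17); omega)]
    rw [show ((x + 1 * 17 + 2 * 17 : Int)) = x + 51 from by ring]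
    rw [show (([3, 4, 5, 6, 7, 8, 9, 10, 11, 12, 13, 14, 15, 16] : List Int).sum) = 133 from by decide]
    norm_num
  rw [List.find?_cons_of_neg (by simp only [decide_eq_true_eq]; exact h2)] at h
  by_cases h3 : x + 102 > 5300
  · rw [List.find?_cons_of_pos (by simp only [decide_eq_true_eq]; exact h3)] at h
    injection h with h; subst h
    rw [show PySem.List.pyRange 0 17 1 = ([0, 1, 2] : List Int) ++ [3, 4, 5, 6, 7, 8, 9, 10, 11, 12, 13, 14, 15, 16] from by decide, List.foldl_append]
    rw [pvnomod [0, 1, 2] x (by decide) (by rw [show (([0, 1, 2] : List Int).sum) = 3 from by decide]; omega)]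
    rw [show (([0, 1, 2] : List Int).sum) = 3 from by decide]
    rw [List.foldl_cons, pvstep_gt (x + 3 * 17) 3 (by omega)]
    rw [pvnomod [4, 5, 6, 7, 8, 9, 10, 11, 12, 13, 14, 15, 16] _ (by decide)
      (by rw [show (([4, 5, 6, 7, 8, 9, 10, 11, 12, 13, 14, 15, 16] : List Int).sum) = 130 from by decide]
          have hb := pvmod_bound (x + 3 * 17 + 3 * 17); omega)]
    rw [show ((x + 3 * 17 + 3 * 17 : Int)) = x + 102 from by ring]
    rw [show (([4, 5, 6, 7, 8, 9, 10, 11, 12, 13, 14, 15, 16] : List Int).sum) = 130 from by decide]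
    norm_num
  rw [List.find?_cons_of_neg (by simp only [decide_eq_true_eq]; exact h3)] at h
  by_cases h4 : x + 170 > 5300
  · rw [List.find?_cons_of_pos (by simp only [decide_eq_true_eq]; exact h4)] at h
    injection h with h; subst h
    rw [show PySem.List.pyRange 0 17 1 = ([0, 1, 2, 3] : List Int) ++ [4, 5, 6, 7, 8, 9, 10, 11, 12, 13, 14, 15, 16] from by decide, List.foldl_append]
    rw [pvnomod [0, 1, 2, 3] x (by decide) (by rw [show (([0, 1, 2, 3] : List Int).sum) = 6 from by decide]; omega)]
    rw [show (([0, 1, 2, 3] : List Int).sum) = 6 from by decide]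
    rw [List.foldl_cons, pvstep_gt (x + 6 * 17) 4 (by omega)]
    rw [pvnomod [5, 6, 7, 8, 9, 10, 11, 12, 13, 14, 15, 16] _ (by decide)
      (by rw [show (([5, 6, 7, 8, 9, 10, 11, 12, 13, 14, 15, 16] : List Int).sum) = 126 from by decide]
          have hb := pvmod_bound (x + 6 * 17 + 4 * 17); omega)]
    rw [show ((x + 6 * 17 + 4 * 17 : Int)) = x + 170 from by ring]
    rw [show (([5, 6, 7, 8, 9, 10, 11, 12, 13, 14, 15, 16] : List Int).sum) = 126 from by decide]
    norm_num
  rw [List.find?_cons_of_neg (by simp only [decide_eq_true_eq]; exact h4)] at h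
  by_cases h5 : x + 255 > 5300
  · rw [List.find?_cons_of_pos (by simp only [decide_eq_true_eq]; exact h5)] at h
    injection h with h; subst h
    rw [show PySem.List.pyRange 0 17 1 = ([0, 1, 2, 3, 4] : List Int) ++ [5, 6, 7, 8, 9, 10, 11, 12, 13, 14, 15, 16] from by decide, List.foldl_append]
    rw [pvnomod [0, 1, 2, 3, 4] x (by decide) (by rw [show (([0, 1, 2, 3, 4] : List Int).sum) = 10 from by decide]; omega)]
    rw [show (([0, 1, 2, 3, 4] : List Int).sum) = 10 from by decide]
    rw [List.foldl_cons, pvstep_gt (x + 10 * 17) 5 (by omega)]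
    rw [pvnomod [6, 7, 8, 9, 10, 11, 12, 13, 14, 15, 16] _ (by decide)
      (by rw [show (([6, 7, 8, 9, 10, 11, 12, 13, 14, 15, 16] : List Int).sum) = 121 from by decide]
          have hb := pvmod_bound (x + 10 * 17 + 5 * 17); omega)]
    rw [show ((x + 10 * 17 + 5 * 17 : Int)) = x + 255 from by ring]
    rw [show (([6, 7, 8, 9, 10, 11, 12, 13, 14, 15, 16] : List Int).sum) = 121 from by decide]
    norm_num
  rw [List.find?_cons_of_neg (by simp only [decide_eq_true_eq]; exact h5)] at h
  by_cases h6 : x + 357 > 5300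
  · rw [List.find?_cons_of_pos (by simp only [decide_eq_true_eq]; exact h6)] at h
    injection h with h; subst h
    rw [show PySem.List.pyRange 0 17 1 = ([0, 1, 2, 3, 4, 5] : List Int) ++ [6, 7, 8, 9, 10, 11, 12, 13, 14, 15, 16] from by decide, List.foldl_append]
    rw [pvnomod [0, 1, 2, 3, 4, 5] x (by decide) (by rw [show (([0, 1, 2, 3, 4, 5] : List Int).sum) = 15 from by decide]; omega)]
    rw [show (([0, 1, 2, 3, 4, 5] : List Int).sum) = 15 from by decide]
    rw [List.foldl_cons, pvstep_gt (x + 15 * 17) 6 (by omega)]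
    rw [pvnomod [7, 8, 9, 10, 11, 12, 13, 14, 15, 16] _ (by decide)
      (by rw [show (([7, 8, 9, 10, 11, 12, 13, 14, 15, 16] : List Int).sum) = 115 from by decide]
          have hb := pvmod_bound (x + 15 * 17 + 6 * 17); omega)]
    rw [show ((x + 15 * 17 + 6 * 17 : Int)) = x + 357 from by ring]
    rw [show (([7, 8, 9, 10, 11, 12, 13, 14, 15, 16] : List Int).sum) = 115 from by decide]
    norm_num
  rw [List.find?_cons_of_neg (by simp only [decide_eq_true_eq]; exact h6)] at h
  by_cases h7 : x + 476 > 5300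
  · rw [List.find?_cons_of_pos (by simp only [decide_eq_true_eq]; exact h7)] at h
    injection h with h; subst h
    rw [show PySem.List.pyRange 0 17 1 = ([0, 1, 2, 3, 4, 5, 6] : List Int) ++ [7, 8, 9, 10, 11, 12, 13, 14, 15, 16] from by decide, List.foldl_append]
    rw [pvnomod [0, 1, 2, 3, 4, 5, 6] x (by decide) (by rw [show (([0, 1, 2, 3, 4, 5, 6] : List Int).sum) = 21 from by decide]; omega)]
    rw [show (([0, 1, 2, 3, 4, 5, 6] : List Int).sum) = 21 from by decide]
    rw [List.foldl_cons, pvstep_gt (x + 21 * 17) 7 (by omega)]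
    rw [pvnomod [8, 9, 10, 11, 12, 13, 14, 15, 16] _ (by decide)
      (by rw [show (([8, 9, 10, 11, 12, 13, 14, 15, 16] : List Int).sum) = 108 from by decide]
          have hb := pvmod_bound (x + 21 * 17 + 7 * 17); omega)]
    rw [show ((x + 21 * 17 + 7 * 17 : Int)) = x + 476 from by ring]
    rw [show (([8, 9, 10, 11, 12, 13, 14, 15, 16] : List Int).sum) = 108 from by decide]
    norm_num
  rw [List.find?_cons_of_neg (by simp only [decide_eq_true_eq]; exact h7)] at h
  by_cases h8 : x + 612 > 5300
  · rw [List.find?_cons_of_pos (by simp only [decide_eq_true_eq]; exact h8)] at h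
    injection h with h; subst h
    rw [show PySem.List.pyRange 0 17 1 = ([0, 1, 2, 3, 4, 5, 6, 7] : List Int) ++ [8, 9, 10, 11, 12, 13, 14, 15, 16] from by decide, List.foldl_append]
    rw [pvnomod [0, 1, 2, 3, 4, 5, 6, 7] x (by decide) (by rw [show (([0, 1, 2, 3, 4, 5, 6, 7] : List Int).sum) = 28 from by decide]; omega)]
    rw [show (([0, 1, 2, 3, 4, 5, 6, 7] : List Int).sum) = 28 from by decide]
    rw [List.foldl_cons, pvstep_gt (x + 28 * 17) 8 (by omega)]
    rw [pvnomod [9, 10, 11, 12, 13, 14, 15, 16] _ (by decide)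
      (by rw [show (([9, 10, 11, 12, 13, 14, 15, 16] : List Int).sum) = 100 from by decide]
          have hb := pvmod_bound (x + 28 * 17 + 8 * 17); omega)]
    rw [show ((x + 28 * 17 + 8 * 17 : Int)) = x + 612 from by ring]
    rw [show (([9, 10, 11, 12, 13, 14, 15, 16] : List Int).sum) = 100 from by decide]
    norm_num
  rw [List.find?_cons_of_neg (by simp only [decide_eq_true_eq]; exact h8)] at h
  by_cases h9 : x + 765 > 5300
  · rw [List.find?_cons_of_pos (by simp only [decide_eq_true_eq]; exact h9)] at h
    injection h with h; subst h
    rw [show PySem.List.pyRange 0 17 1 = ([0, 1, 2, 3, 4, 5, 6, 7, 8] : List Int) ++ [9, 10, 11, 12, 13, 14, 15, 16] from by decide, List.foldl_append]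
    rw [pvnomod [0, 1, 2, 3, 4, 5, 6, 7, 8] x (by decide) (by rw [show (([0, 1, 2, 3, 4, 5, 6, 7, 8] : List Int).sum) = 36 from by decide]; omega)]
    rw [show (([0, 1, 2, 3, 4, 5, 6, 7, 8] : List Int).sum) = 36 from by decide]
    rw [List.foldl_cons, pvstep_gt (x + 36 * 17) 9 (by omega)]
    rw [pvnomod [10, 11, 12, 13, 14, 15, 16] _ (by decide)
      (by rw [show (([10, 11, 12, 13, 14, 15, 16] : List Int).sum) = 91 from by decide]
          have hb := pvmod_bound (x + 36 * 17 + 9 * 17); omega)]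
    rw [show ((x + 36 * 17 + 9 * 17 : Int)) = x + 765 from by ring]
    rw [show (([10, 11, 12, 13, 14, 15, 16] : List Int).sum) = 91 from by decide]
    norm_num
  rw [List.find?_cons_of_neg (by simp only [decide_eq_true_eq]; exact h9)] at h
  by_cases h10 : x + 935 > 5300
  · rw [List.find?_cons_of_pos (by simp only [decide_eq_true_eq]; exact h10)] at h
    injection h with h; subst h
    rw [show PySem.List.pyRange 0 17 1 = ([0, 1, 2, 3, 4, 5, 6, 7, 8, 9] : List Int) ++ [10, 11, 12, 13, 14, 15, 16] from by decide, List.foldl_append]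
    rw [pvnomod [0, 1, 2, 3, 4, 5, 6, 7, 8, 9] x (by decide) (by rw [show (([0, 1, 2, 3, 4, 5, 6, 7, 8, 9] : List Int).sum) = 45 from by decide]; omega)]
    rw [show (([0, 1, 2, 3, 4, 5, 6, 7, 8, 9] : List Int).sum) = 45 from by decide]
    rw [List.foldl_cons, pvstep_gt (x + 45 * 17) 10 (by omega)]
    rw [pvnomod [11, 12, 13, 14, 15, 16] _ (by decide)
      (by rw [show (([11, 12, 13, 14, 15, 16] : List Int).sum) = 81 from by decide]
          have hb := pvmod_bound (x + 45 * 17 + 10 * 17); omega)]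
    rw [show ((x + 45 * 17 + 10 * 17 : Int)) = x + 935 from by ring]
    rw [show (([11, 12, 13, 14, 15, 16] : List Int).sum) = 81 from by decide]
    norm_num
  rw [List.find?_cons_of_neg (by simp only [decide_eq_true_eq]; exact h10)] at h
  by_cases h11 : x + 1122 > 5300
  · rw [List.find?_cons_of_pos (by simp only [decide_eq_true_eq]; exact h11)] at h
    injection h with h; subst h
    rw [show PySem.List.pyRange 0 17 1 = ([0, 1, 2, 3, 4, 5, 6, 7, 8, 9, 10] : List Int) ++ [11, 12, 13, 14, 15, 16] from by decide, List.foldl_append]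
    rw [pvnomod [0, 1, 2, 3, 4, 5, 6, 7, 8, 9, 10] x (by decide) (by rw [show (([0, 1, 2, 3, 4, 5, 6, 7, 8, 9, 10] : List Int).sum) = 55 from by decide]; omega)]
    rw [show (([0, 1, 2, 3, 4, 5, 6, 7, 8, 9, 10] : List Int).sum) = 55 from by decide]
    rw [List.foldl_cons, pvstep_gt (x + 55 * 17) 11 (by omega)]
    rw [pvnomod [12, 13, 14, 15, 16] _ (by decide)
      (by rw [show (([12, 13, 14, 15, 16] : List Int).sum) = 70 from by decide]
          have hb := pvmod_bound (x + 55 * 17 + 11 * 17); omega)]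
    rw [show ((x + 55 * 17 + 11 * 17 : Int)) = x + 1122 from by ring]
    rw [show (([12, 13, 14, 15, 16] : List Int).sum) = 70 from by decide]
    norm_num
  rw [List.find?_cons_of_neg (by simp only [decide_eq_true_eq]; exact h11)] at h
  by_cases h12 : x + 1326 > 5300
  · rw [List.find?_cons_of_pos (by simp only [decide_eq_true_eq]; exact h12)] at h
    injection h with h; subst h
    rw [show PySem.List.pyRange 0 17 1 = ([0, 1, 2, 3, 4, 5, 6, 7, 8, 9, 10, 11] : List Int) ++ [12, 13, 14, 15, 16] from by decide, List.foldl_append]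
    rw [pvnomod [0, 1, 2, 3, 4, 5, 6, 7, 8, 9, 10, 11] x (by decide) (by rw [show (([0, 1, 2, 3, 4, 5, 6, 7, 8, 9, 10, 11] : List Int).sum) = 66 from by decide]; omega)]
    rw [show (([0, 1, 2, 3, 4, 5, 6, 7, 8, 9, 10, 11] : List Int).sum) = 66 from by decide]
    rw [List.foldl_cons, pvstep_gt (x + 66 * 17) 12 (by omega)]
    rw [pvnomod [13, 14, 15, 16] _ (by decide)
      (by rw [show (([13, 14, 15, 16] : List Int).sum) = 58 from by decide]
          have hb := pvmod_bound (x + 66 * 17 + 12 * 17); omega)]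
    rw [show ((x + 66 * 17 + 12 * 17 : Int)) = x + 1326 from by ring]
    rw [show (([13, 14, 15, 16] : List Int).sum) = 58 from by decide]
    norm_num
  rw [List.find?_cons_of_neg (by simp only [decide_eq_true_eq]; exact h12)] at h
  by_cases h13 : x + 1547 > 5300
  · rw [List.find?_cons_of_pos (by simp only [decide_eq_true_eq]; exact h13)] at h
    injection h with h; subst h
    rw [show PySem.List.pyRange 0 17 1 = ([0, 1, 2, 3, 4, 5, 6, 7, 8, 9, 10, 11, 12] : List Int) ++ [13, 14, 15, 16] from by decide, List.foldl_append]
    rw [pvnomod [0, 1, 2, 3, 4, 5, 6, 7, 8, 9, 10, 11, 12] x (by decide) (by rw [show (([0, 1, 2, 3, 4, 5, 6, 7, 8, 9, 10, 11, 12] : List Int).sum) = 78 from by decide]; omega)]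
    rw [show (([0, 1, 2, 3, 4, 5, 6, 7, 8, 9, 10, 11, 12] : List Int).sum) = 78 from by decide]
    rw [List.foldl_cons, pvstep_gt (x + 78 * 17) 13 (by omega)]
    rw [pvnomod [14, 15, 16] _ (by decide)
      (by rw [show (([14, 15, 16] : List Int).sum) = 45 from by decide]
          have hb := pvmod_bound (x + 78 * 17 + 13 * 17); omega)]
    rw [show ((x + 78 * 17 + 13 * 17 : Int)) = x + 1547 from by ring]
    rw [show (([14, 15, 16] : List Int).sum) = 45 from by decide]
    norm_num
  rw [List.find?_cons_of_neg (by simp only [decide_eq_true_eq]; exact h13)] at h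
  by_cases h14 : x + 1785 > 5300
  · rw [List.find?_cons_of_pos (by simp only [decide_eq_true_eq]; exact h14)] at h
    injection h with h; subst h
    rw [show PySem.List.pyRange 0 17 1 = ([0, 1, 2, 3, 4, 5, 6, 7, 8, 9, 10, 11, 12, 13] : List Int) ++ [14, 15, 16] from by decide, List.foldl_append]
    rw [pvnomod [0, 1, 2, 3, 4, 5, 6, 7, 8, 9, 10, 11, 12, 13] x (by decide) (by rw [show (([0, 1, 2, 3, 4, 5, 6, 7, 8, 9, 10, 11, 12, 13] : List Int).sum) = 91 from by decide]; omega)]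
    rw [show (([0, 1, 2, 3, 4, 5, 6, 7, 8, 9, 10, 11, 12, 13] : List Int).sum) = 91 from by decide]
    rw [List.foldl_cons, pvstep_gt (x + 91 * 17) 14 (by omega)]
    rw [pvnomod [15, 16] _ (by decide)
      (by rw [show (([15, 16] : List Int).sum) = 31 from by decide]
          have hb := pvmod_bound (x + 91 * 17 + 14 * 17); omega)]
    rw [show ((x + 91 * 17 + 14 * 17 : Int)) = x + 1785 from by ring]
    rw [show (([15, 16] : List Int).sum) = 31 from by decide]
    norm_num
  rw [List.find?_cons_of_neg (by simp only [decide_eq_true_eq]; exact h14)] at h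
  by_cases h15 : x + 2040 > 5300
  · rw [List.find?_cons_of_pos (by simp only [decide_eq_true_eq]; exact h15)] at h
    injection h with h; subst h
    rw [show PySem.List.pyRange 0 17 1 = ([0, 1, 2, 3, 4, 5, 6, 7, 8, 9, 10, 11, 12, 13, 14] : List Int) ++ [15, 16] from by decide, List.foldl_append]
    rw [pvnomod [0, 1, 2, 3, 4, 5, 6, 7, 8, 9, 10, 11, 12, 13, 14] x (by decide) (by rw [show (([0, 1, 2, 3, 4, 5, 6, 7, 8, 9, 10, 11, 12, 13, 14] : List Int).sum) = 105 from by decide]; omega)]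
    rw [show (([0, 1, 2, 3, 4, 5, 6, 7, 8, 9, 10, 11, 12, 13, 14] : List Int).sum) = 105 from by decide]
    rw [List.foldl_cons, pvstep_gt (x + 105 * 17) 15 (by omega)]
    rw [pvnomod [16] _ (by decide)
      (by rw [show (([16] : List Int).sum) = 16 from by decide]
          have hb := pvmod_bound (x + 105 * 17 + 15 * 17); omega)]
    rw [show ((x + 105 * 17 + 15 * 17 : Int)) = x + 2040 from by ring]
    rw [show (([16] : List Int).sum) = 16 from by decide]
    norm_num
  rw [List.find?_cons_of_neg (by simp only [decide_eq_true_eq]; exact h15)] at h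
  by_cases h16 : x + 2312 > 5300
  · rw [List.find?_cons_of_pos (by simp only [decide_eq_true_eq]; exact h16)] at h
    injection h with h; subst h
    rw [show PySem.List.pyRange 0 17 1 = ([0, 1, 2, 3, 4, 5, 6, 7, 8, 9, 10, 11, 12, 13, 14, 15] : List Int) ++ [16] from by decide, List.foldl_append]
    rw [pvnomod [0, 1, 2, 3, 4, 5, 6, 7, 8, 9, 10, 11, 12, 13, 14, 15] x (by decide) (by rw [show (([0, 1, 2, 3, 4, 5, 6, 7, 8, 9, 10, 11, 12, 13, 14, 15] : List Int).sum) = 120 from by decide]; omega)]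
    rw [show (([0, 1, 2, 3, 4, 5, 6, 7, 8, 9, 10, 11, 12, 13, 14, 15] : List Int).sum) = 120 from by decide]
    rw [List.foldl_cons, pvstep_gt (x + 120 * 17) 16 (by omega)]
    rw [pvnomod [] _ (by decide)
      (by rw [show (([] : List Int).sum) = 0 from by decide]
          have hb := pvmod_bound (x + 120 * 17 + 16 * 17); omega)]
    rw [show ((x + 120 * 17 + 16 * 17 : Int)) = x + 2312 from by ring]
    rw [show (([] : List Int).sum) = 0 from by decide]
    norm_num
  rw [List.find?_cons_of_neg (by simp only [decide_eq_true_eq]; exact h16)] at h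
  exact absurd h (by simp)

-- the x-fold when no crossing exists: pure accumulation
theorem pvKey_none (x : Int)
    (h : pvSUMS.find? (fun t => decide (x + t > 5300)) = none) :
    (PySem.List.pyRange 0 17 1).foldl (fun x i => if x + i * 17 > 5300 then PySem.Int.mod (x + i * 17) 1150 else x + i * 17) x = x + 2312 := by
  rw [List.find?_eq_none] at h
  have h2312 := h 2312 (by decide)
  simp only [decide_eq_true_eq] at h2312
  rw [pvnomod _ x (by decide) (by rw [show ((PySem.List.pyRange 0 17 1).sum) = 136 from by decide]; omega)]
  rw [show ((PySem.List.pyRange 0 17 1).sum) = 136 from by decide]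
  norm_num

-- ===== VERDICT =====
theorem compute_2_10_spec : Claim_equal_compute_2_10 := by
  intro a b c _
  show compute_2_10 a b c = compute_2_10_alt a b c
  unfold compute_2_10 compute_2_10_alt
  simp only [pvFold_split]
  cases hf : pvSUMS.find? (fun s => decide (a * 65 + b * 98 + s > 5300)) with
  | none =>
    rw [pvKey_none _ hf]
    have hs : (PySem.List.pyRange 0 17 1).sum = 136 := by decide
    rw [hs]; unfold pvTOTAL; ring
  | some s =>
    rw [pvKey_some _ s hf]
    have hs : (PySem.List.pyRange 0 17 1).sum = 136 := by decide
    rw [hs]; unfold pvTOTAL; ring
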